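-- pv_equiv track=rewrite | github.com/pruittcolon/Vox_Amelior | shared/gemma_context_analyzer.py | find_emotional_triggers
-- ===== SOURCE A (Python) =====
-- from typing import Dict, List, Any, Tuple, Optional
--
-- def find_emotional_triggers(lines: List[str]) -> List[int]:
--     """Find line indices that contain emotional triggers"""
--     emotional_keywords = [
--         'angry', 'frustrated', 'mad', 'upset', 'annoyed', 'irritated',
--         'disappointed', 'hurt', 'sad', 'worried', 'anxious', 'stressed',
--         'excited', 'happy', 'joyful', 'thrilled', 'elated', 'ecstatic'
--     ]
--
--     trigger_lines = []
--     for i, line in enumerate(lines):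
--         line_lower = line.lower()
--         if any(keyword in line_lower for keyword in emotional_keywords):
--             trigger_lines.append(i)
--
--     return trigger_lines
-- ===== SOURCE B (Python) =====
-- def _build_trie(keywords):
--     root = {}
--     for kw in keywords:
--         node = root
--         for ch in kw:
--             node = node.setdefault(ch, {})
--         node['$'] = True
--     return root
--
--
-- def _has_trigger(s, root):
--     n = len(s)
--     for i in range(n):
--         node = root
--         j = i
--         while True:
--             if '$' in node:
--                 return True
--             if j >= n or s[j] not in node:
--                 break
--             node = node[s[j]]
--             j += 1
--     return False
--
--
-- def find_emotional_triggers(lines):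
--     """Find line indices that contain emotional triggers"""
--     emotional_keywords = [
--         'angry', 'frustrated', 'mad', 'upset', 'annoyed', 'irritated',
--         'disappointed', 'hurt', 'sad', 'worried', 'anxious', 'stressed',
--         'excited', 'happy', 'joyful', 'thrilled', 'elated', 'ecstatic'
--     ]
--     root = _build_trie(emotional_keywords)
--     return [i for i, line in enumerate(lines) if _has_trigger(line.lower(), root)]
-- ===== Notes on version B (the rewrite author's own statement) =====
-- stated objective: alternative
-- what changed: B builds a trie (prefix tree) of the 18 keywords once and detects a match by walking the trie left-to-right from each start position of the lowercased line, replacing A's per-keyword 'kw in line' substring scans with a single shared-prefix automaton structure.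
import Mathlib
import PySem

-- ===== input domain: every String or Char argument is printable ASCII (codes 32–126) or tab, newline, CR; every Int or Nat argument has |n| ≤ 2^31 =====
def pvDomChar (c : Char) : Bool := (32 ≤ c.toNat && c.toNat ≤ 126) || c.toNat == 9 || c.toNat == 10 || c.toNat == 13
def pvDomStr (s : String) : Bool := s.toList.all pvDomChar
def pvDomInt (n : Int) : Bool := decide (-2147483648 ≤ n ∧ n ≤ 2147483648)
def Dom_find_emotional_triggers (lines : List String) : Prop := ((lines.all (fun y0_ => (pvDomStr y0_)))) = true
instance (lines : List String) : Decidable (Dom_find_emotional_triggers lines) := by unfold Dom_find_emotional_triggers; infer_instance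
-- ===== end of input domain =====

-- B builds a trie (prefix tree) of the 18 keywords once and finds matches by a single
-- left-to-right trie walk from each start position, instead of A's per-keyword substring
-- scan of every line; objective: alternative algorithm/data structure, same overall cost.

-- ===== PORT A =====
def pvKeywordsA : List String :=
  ["angry", "frustrated", "mad", "upset", "annoyed", "irritated",
   "disappointed", "hurt", "sad", "worried", "anxious", "stressed",
   "excited", "happy", "joyful", "thrilled", "elated", "ecstatic"]

def find_emotional_triggers (lines : List String) : List Int :=
  (PySem.List.enumerate lines).foldl
    (fun trigger_lines p =>
      let line_lower := PySem.Str.lower p.2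
      if pvKeywordsA.any (fun keyword => PySem.Str.isIn keyword line_lower)
      then trigger_lines ++ [p.1] else trigger_lines) []

-- ===== PORT B =====
-- a trie node: terminal flag ('$' in the Python dict) + ordered edge list (the dict);
-- mutual pair instead of a nested inductive
mutual
inductive PTrie : Type
  | node : Bool → PEdges → PTrie
inductive PEdges : Type
  | nil : PEdges
  | cons : Char → PTrie → PEdges → PEdges
end

-- node.get(ch): first (only) matching edge
def lookupE (c : Char) : PEdges → Option PTrie
  | .nil => none
  | .cons d t rest => if d = c then some t else lookupE c rest

-- the inner 'for ch in kw: node = node.setdefault(ch, {})' + 'node["$"] = True' of _build_trie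
mutual
def insertT : List Char → PTrie → PTrie
  | [], .node _ es => .node true es
  | c :: cs, .node b es => .node b (updateE c cs es)
termination_by w _ => (w.length, 0, 0)
def updateE : Char → List Char → PEdges → PEdges
  | c, cs, .nil => .cons c (insertT cs (.node false .nil)) .nil
  | c, cs, .cons d t rest =>
      if d = c then .cons d (insertT cs t) rest else .cons d t (updateE c cs rest)
termination_by _ cs es => (cs.length, 1, sizeOf es)
end

-- the inner 'while True' of _has_trigger: check '$', else follow the edge for the next char;
-- j advancing over s is consuming the char list
def walk : PTrie → List Char → Bool
  | .node true _, _ => true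
  | .node false _, [] => false
  | .node false es, c :: cs =>
      match lookupE c es with
      | none => false
      | some t => walk t cs
termination_by _ cs => cs.length

-- _has_trigger: the 'for i in range(n)' loop with early return
def hasTrigger (cs : List Char) (root : PTrie) : Bool :=
  (List.range cs.length).any (fun i => walk root (cs.drop i))

def pvKeywordsB : List String :=
  ["angry", "frustrated", "mad", "upset", "annoyed", "irritated",
   "disappointed", "hurt", "sad", "worried", "anxious", "stressed",
   "excited", "happy", "joyful", "thrilled", "elated", "ecstatic"]

-- _build_trie's outer loop
def pvRoot : PTrie :=
  pvKeywordsB.foldl (fun t kw => insertT kw.toList t) (.node false .nil)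

def find_emotional_triggers_alt (lines : List String) : List Int :=
  ((PySem.List.enumerate lines).filter
      (fun p => hasTrigger (PySem.Str.lower p.2).toList pvRoot)).map (fun p => p.1)

-- ===== PRECONDITION & SPEC =====
def Spec_find_emotional_triggers (lines : List String) (out : List Int) : Prop := out = find_emotional_triggers_alt lines
instance (lines : List String) (out : List Int) : Decidable (Spec_find_emotional_triggers lines out) := by unfold Spec_find_emotional_triggers; infer_instance

-- ===== CLAIM =====
def Claim_equal_find_emotional_triggers : Prop := ∀ (lines : List String), Dom_find_emotional_triggers lines → Spec_find_emotional_triggers lines (find_emotional_triggers lines)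

-- ===== LEMMAS AND PROOFS =====

theorem pv_walk_empty (cs : List Char) : walk (.node false .nil) cs = false := by
  cases cs <;> simp [walk, lookupE]

theorem pv_lookup_update (c : Char) (cs : List Char) (d : Char) (es : PEdges) :
    lookupE d (updateE c cs es)
      = if d = c then some (insertT cs ((lookupE c es).getD (.node false .nil)))
        else lookupE d es := by
  match es with
  | .nil =>
      simp only [updateE, lookupE]
      by_cases h : d = c
      · subst h; simp
      · have hcd : ¬ c = d := fun hh => h hh.symm
        simp [hcd, h]
  | .cons e t rest =>
      have ih := pv_lookup_update c cs d rest
      simp only [updateE]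
      by_cases hec : e = c
      · subst hec
        simp only [lookupE]
        by_cases hde : d = e
        · subst hde; simp [lookupE]
        · have hed : ¬ e = d := fun hh => hde hh.symm
          simp [lookupE, hde, hed]
      · simp only [if_neg hec, lookupE]
        by_cases hde : d = e
        · subst hde
          have hne : ¬ d = c := hec
          simp [hne]
        · have hed : ¬ e = d := fun hh => hde hh.symm
          simp [hed, ih]

theorem pv_walk_insert (w : List Char) : ∀ (t : PTrie) (cs : List Char),
    walk (insertT w t) cs = (decide (w <+: cs) || walk t cs) := by
  induction w with
  | nil =>
      intro t cs
      cases t with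
      | node b es => simp [insertT, walk]
  | cons c w' ih =>
      intro t cs
      cases t with
      | node b es =>
        cases b with
        | true =>
            cases cs with
            | nil => simp [insertT, walk]
            | cons d ds => simp [insertT, walk]
        | false =>
            cases cs with
            | nil => simp [insertT, walk]
            | cons d ds =>
                simp only [insertT, walk, pv_lookup_update]
                by_cases hdc : d = c
                · subst hdc
                  simp only [List.cons_prefix_cons, true_and]
                  cases h : lookupE d es with
                  | none => simp [ih, pv_walk_empty]
                  | some ch => simp [ih]
                · have hcd : ¬ (c = d) := fun hh => hdc hh.symm
                  simp [hdc, List.cons_prefix_cons, hcd]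

theorem pv_walk_foldl (kws : List String) : ∀ (t : PTrie) (cs : List Char),
    walk (kws.foldl (fun t kw => insertT kw.toList t) t) cs
      = (kws.any (fun kw => decide (kw.toList <+: cs)) || walk t cs) := by
  induction kws with
  | nil => intro t cs; simp
  | cons kw kws ih =>
      intro t cs
      simp [List.foldl_cons, ih, pv_walk_insert, Bool.or_comm, Bool.or_assoc]

theorem pv_kwsB_ne_nil : ∀ kw ∈ pvKeywordsB, kw.toList ≠ [] := by decide

theorem pv_hasTrigger_eq (cs : List Char) :
    hasTrigger cs pvRoot = pvKeywordsB.any (fun kw => PySem.Chars.isIn kw.toList cs) := by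
  rw [Bool.eq_iff_iff]
  simp only [hasTrigger, pvRoot, pv_walk_foldl, pv_walk_empty, Bool.or_false,
    List.any_eq_true, List.mem_range, decide_eq_true_eq]
  constructor
  · rintro ⟨i, _, kw, hkw, hpre⟩
    exact ⟨kw, hkw, (PySem.Chars.exists_prefix_drop_iff_isIn _ _).mp ⟨i, hpre⟩⟩
  · rintro ⟨kw, hkw, hin⟩
    obtain ⟨j, hpre⟩ := (PySem.Chars.exists_prefix_drop_iff_isIn _ _).mpr hin
    by_cases hj : j < cs.length
    · exact ⟨j, hj, kw, hkw, hpre⟩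
    · exfalso
      have : cs.drop j = [] := List.drop_eq_nil_of_le (Nat.le_of_not_lt hj)
      rw [this] at hpre
      exact pv_kwsB_ne_nil kw hkw (List.prefix_nil.mp hpre)

theorem pv_filter_eq (lines : List String) :
    (PySem.List.enumerate lines).filter
        (fun p => hasTrigger (PySem.Str.lower p.2).toList pvRoot)
      = (PySem.List.enumerate lines).filter
        (fun p => pvKeywordsA.any (fun keyword => PySem.Str.isIn keyword (PySem.Str.lower p.2))) := by
  apply List.filter_congr
  intro p _
  rw [pv_hasTrigger_eq]
  have hk : pvKeywordsB = pvKeywordsA := rfl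
  rw [hk]
  simp only [PySem.Str.isIn_eq]

-- ===== VERDICT =====
theorem find_emotional_triggers_spec : Claim_equal_find_emotional_triggers := by
  intro lines _
  unfold Spec_find_emotional_triggers find_emotional_triggers find_emotional_triggers_alt
  rw [PySem.List.foldl_append_if]
  simp only [List.nil_append]
  rw [pv_filter_eq]
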